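-- pv_equiv track=rewrite | github.com/jdhuntington/advent2024 | day09/problem1.py | is_packed
-- ===== SOURCE A (Python) =====
-- def is_packed(fs):
--     seen_none = False
--     for x in fs:
--         if x is None:
--             seen_none = True
--         elif seen_none:
--             return False
--     return True
-- ===== SOURCE B (Python) =====
-- def is_packed(fs):
--     fs = list(fs)
--     return all(not (a is None and b is not None) for a, b in zip(fs, fs[1:]))
-- ===== Notes on version B (the rewrite author's own statement) =====
-- stated objective: alternative
-- what changed: B replaces A's stateful scan with a seen_none flag (and early return) by a stateless local criterion: it checks every adjacent pair, requiring that no None is immediately followed by a non-None value.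
import Mathlib
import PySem

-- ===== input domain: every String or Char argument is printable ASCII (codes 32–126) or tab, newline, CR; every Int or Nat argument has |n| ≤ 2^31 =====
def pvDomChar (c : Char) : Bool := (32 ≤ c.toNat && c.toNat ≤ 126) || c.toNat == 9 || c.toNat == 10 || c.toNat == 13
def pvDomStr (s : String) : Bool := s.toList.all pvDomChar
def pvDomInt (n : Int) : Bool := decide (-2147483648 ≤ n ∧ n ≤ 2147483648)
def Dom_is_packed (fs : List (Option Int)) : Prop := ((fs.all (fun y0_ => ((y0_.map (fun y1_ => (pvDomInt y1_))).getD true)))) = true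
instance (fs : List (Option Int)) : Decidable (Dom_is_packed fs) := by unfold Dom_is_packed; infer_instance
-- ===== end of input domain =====

-- ===== PORT A =====
-- B replaces A's seen_none-flag scan by a stateless check over adjacent pairs: no None is immediately followed by a value (alternative, same cost).
-- loop with seen_none flag; 'some x with seen_none=True' returns False early
def isPackedLoop (fs : List (Option Int)) (seen_none : Bool) : Bool :=
  match fs with
  | [] => true
  | x :: rest =>
    match x with
    | none => isPackedLoop rest true
    | some _ => if seen_none then false else isPackedLoop rest seen_none

def is_packed (fs : List (Option Int)) : Bool := isPackedLoop fs false

-- ===== PORT B =====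
-- all(not (a is None and b is not None) for a, b in zip(fs, fs[1:]))
def is_packed_alt (fs : List (Option Int)) : Bool :=
  (fs.zip (PySem.List.slice fs (some 1) none)).all (fun p => !(p.1.isNone && !p.2.isNone))

-- ===== PRECONDITION & SPEC =====
def Spec_is_packed (fs : List (Option Int)) (out : Bool) : Prop := out = is_packed_alt fs
instance (fs : List (Option Int)) (out : Bool) : Decidable (Spec_is_packed fs out) := by unfold Spec_is_packed; infer_instance

-- ===== CLAIM (what is proved, stated in full; the proofs are below) =====
def Claim_equal_is_packed : Prop := ∀ (fs : List (Option Int)), Dom_is_packed fs → Spec_is_packed fs (is_packed fs)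

-- ===== LEMMAS AND PROOFS =====


-- B's pair check, unfolded into a recursion over the list
theorem alt_cons_cons (x y : Option Int) (rest : List (Option Int)) :
    is_packed_alt (x :: y :: rest) =
      ((!(x.isNone && !y.isNone)) && is_packed_alt (y :: rest)) := by
  simp [is_packed_alt, PySem.List.slice_from_one, List.zip]

theorem alt_none (rest : List (Option Int)) :
    is_packed_alt (none :: rest) = rest.all (fun y => y.isNone) := by
  induction rest with
  | nil => simp [is_packed_alt, PySem.List.slice_from_one]
  | cons y t ih =>
    rw [alt_cons_cons]
    cases y with
    | none => simp [ih, Option.isNone]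
    | some a => simp [is_packed_alt, Option.isNone]

theorem loop_true_eq_all (fs : List (Option Int)) :
    isPackedLoop fs true = fs.all (fun y => y.isNone) := by
  induction fs with
  | nil => rfl
  | cons x rest ih =>
    cases x <;> simp [isPackedLoop, List.all_cons, ih, Option.isNone]

theorem loop_false_eq_alt (fs : List (Option Int)) :
    isPackedLoop fs false = is_packed_alt fs := by
  induction fs with
  | nil => rfl
  | cons x rest ih =>
    cases x with
    | none => simp [isPackedLoop, loop_true_eq_all, alt_none]
    | some a =>
      cases rest with
      | nil => simp [isPackedLoop, is_packed_alt, PySem.List.slice_from_one]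
      | cons y t =>
        rw [alt_cons_cons]
        simpa [isPackedLoop, Option.isNone] using ih

-- ===== VERDICT =====
theorem is_packed_spec : Claim_equal_is_packed := by
  intro fs _
  unfold Spec_is_packed is_packed
  exact loop_false_eq_alt fs
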